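/- GENERATED by mk_final_copies.py from the proof of the farm's unit `start_decoder.C11a` (farm:start_decoder.C11a.1: Lemmas.lean) as the
   re-elaboration sweep compiled it — do not edit. -/
import Asan.CheckWalk
import Vorbis.Spec.Reader
import Vorbis.Spec.StartDecoderC4
import Vorbis.Spec.Units.start_decoder_C11a

open X86 X86.User Asan Vorbis Vorbis.Spec Vorbis.Spec.StartDecoder

set_option maxRecDepth 4000
set_option maxHeartbeats 4000000

namespace Vorbis.Spec.start_decoder_C11a

/-- **A window the stretch C11a may write**: the stack below the steady `R` (a pushed return address, a callee's frame), the field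
`minimum_value` `[c + 16, c + 20)` of the struct, the reader's five windows of `*f`. Narrower than `C11.QuietWin11`: `lookup_type`
(`c + 25`) and `lookup_values` (`[c + 28, c + 32)`) are outside every such window. -/
def QuietA (g : Ghost) (c : Nat) (w : Span) : Prop :=
  (g.R - 408 ≤ w.lo ∧ w.hi ≤ g.R) ∨
  (c + 16 ≤ w.lo ∧ w.hi ≤ c + 20) ∨
  (g.f + 48 ≤ w.lo ∧ w.hi ≤ g.f + 56) ∨
  (g.f + 84 ≤ w.lo ∧ w.hi ≤ g.f + 96) ∨
  (g.f + 136 ≤ w.lo ∧ w.hi ≤ g.f + 144) ∨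
  (g.f + 1484 ≤ w.lo ∧ w.hi ≤ g.f + 1749) ∨
  (g.f + 1752 ≤ w.lo ∧ w.hi ≤ g.f + 1784)

/-- **The carry of `In11P` over a stretch of C11a**: a memory change confined to `QuietA` windows keeps every clause of `In11P`
(`C11.core11` for `Frame`, `Cur`, K1 – K5, `dimensions`, `entries`, `multiplicands`; `lookup_type` and `lookup_values` lie in
`[c + 24, c + 32)`, which no `QuietA` window meets). -/
theorem carryA {u₀ : State} {g : Ghost} {i : Nat} {A2 A3 Ai : Arena} {A : Arena × List Obj} {pc pc' : Word} {v w : State}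
    {ws : List Span} (h : In11P u₀ g i A2 A3 Ai A pc v)
    (hs : Mem.SameExcept ws v.mem w.mem) (hun : ShadowUntouched v.mem w.mem)
    (hq : ∀ x, x ∈ ws → QuietA g (g.cb v.mem i) x) (hb : Bits (g.Blk A) g.len w.mem g.f)
    (hrip : w.rip = pc') (hrsp : w.reg .rsp = v.reg .rsp) (hcode : CodeOK u₀ w.mem) (hinv : abiInv w)
    (hr14 : w.reg .r14 = v.reg .r14) :
    In11P u₀ g i A2 A3 Ai A pc' w := by
  have hq11 : ∀ x, x ∈ ws → C11.QuietWin11 g (g.cb v.mem i) x := by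
    intro x hx
    have k := hq x hx
    unfold QuietA at k
    unfold C11.QuietWin11
    omega
  obtain ⟨hF, hC, hcb, hk15, e_dim, e_ent, e_mu⟩ :=
    C11.core11 h.frame h.cur h.k hs hun hq11 hb hrip hrsp hcode hinv hr14
  have hpos : Pos g A := Pos.of h.frame h.cur
  have hm0 : MInv g i A2 A3 Ai A v.mem := MInv.of h.frame h.cur
  have hcw := hm0.c_where
  have p1 := hpos.r_eq
  have p2 := hpos.ra_lo
  have p3 := hpos.ra_hi
  have p4 := hpos.objOut
  -- `[c + 24, c + 32)`: `value_bits`, `lookup_type`, `sequence_p`, `sparse`, `lookup_values`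
  have hfld : Mem.EqOn (g.cb v.mem i + 24) (g.cb v.mem i + 32) v.mem w.mem := by
    apply hs.eqOn
    intro x hx
    have k := hq x hx
    unfold QuietA at k
    omega
  have e_lt : Codebook.lookup_type w.mem (g.cb v.mem i) = Codebook.lookup_type v.mem (g.cb v.mem i) := by
    simp only [vacc, voff]
    exact hfld.u8 _ (by omega) (by omega) (by omega)
  have e_lv : Codebook.lookup_values w.mem (g.cb v.mem i) = Codebook.lookup_values v.mem (g.cb v.mem i) := by
    simp only [vacc, voff]
    exact hfld.u32 _ (by omega) (by omega) (by omega)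
  exact
    { frame := hF
      cur := hC
      k := by rw [hcb]; exact hk15
      type_12 := by rw [hcb, e_lt]; exact h.type_12
      prod_le := by rw [hcb, e_ent, e_dim]; exact h.prod_le
      noTemps := h.noTemps
      lv0 := by rw [hcb, e_lv]; exact h.lv0
      mu0 := by rw [hcb, e_mu]; exact h.mu0 }

/-- Two footprints in sequence: the union of the window lists. -/
theorem same_append {ws1 ws2 : List Span} {m1 m2 m3 : Mem} (h1 : Mem.SameExcept ws1 m1 m2) (h2 : Mem.SameExcept ws2 m2 m3) :
    Mem.SameExcept (ws1 ++ ws2) m1 m3 := by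
  refine Mem.SameExcept.trans (ν := m2) (h1.mono ?_) (h2.mono ?_)
  · intro w hw a l r
    exact ⟨w, List.mem_append_left _ hw, l, r⟩
  · intro w hw a l r
    exact ⟨w, List.mem_append_right _ hw, l, r⟩

/-- Every window of two lists is quiet when every window of each is. -/
theorem quiet_append {g : Ghost} {c : Nat} {ws1 ws2 : List Span} (h1 : ∀ x, x ∈ ws1 → QuietA g c x)
    (h2 : ∀ x, x ∈ ws2 → QuietA g c x) : ∀ x, x ∈ ws1 ++ ws2 → QuietA g c x := by
  intro x hx
  rcases List.mem_append.mp hx with h | h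
  · exact h1 x h
  · exact h2 x h

/-- **The push of a return address** at the steady `rsp` (`[R − 8, R)`) is a store into the stack window below `R`. -/
theorem push_same (g : Ghost) (m : Mem) (x : Nat) (hr1 : g.R + 1480 = (g.e.reg .rsp).toNat)
    (hroom : 7340032 + 1888 ≤ (g.e.reg .rsp).toNat) (htop : (g.e.reg .rsp).toNat + 8 ≤ 8388608) :
    Mem.SameExcept [⟨g.R - 408, g.R⟩] m (m.writeLE (g.e.reg .rsp - 1488) 8 x) := by
  have t1 : (g.e.reg .rsp - 1488).toNat = (g.e.reg .rsp).toNat - 1488 := by u_omega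
  refine Mem.SameExcept.writeLE _ m _ 8 _ ?_ ⟨⟨g.R - 408, g.R⟩, List.mem_cons_self, ?_, ?_⟩
  · rw [t1]
    omega
  · rw [t1]
    show g.R - 408 ≤ _
    omega
  · rw [t1]
    show _ ≤ g.R
    omega

/-- The one stack window `[R − 408, R)` is quiet. -/
theorem quiet_stack (g : Ghost) (c : Nat) : ∀ x, x ∈ [(⟨g.R - 408, g.R⟩ : Span)] → QuietA g c x := by
  intro x hx
  rw [List.mem_singleton.mp hx]
  unfold QuietA
  left
  exact ⟨Nat.le_refl _, Nat.le_refl _⟩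

/-- **The footprint of a `get_bits` called at the steady `rsp`** (its frame below the pushed return address, the reader's five
windows of `*f`) is quiet. -/
theorem quiet_reader (g : Ghost) (c : Nat) (hr1 : g.R + 1480 = (g.e.reg .rsp).toNat) :
    ∀ x, x ∈ [(⟨(g.e.reg .rsp).toNat - 1488 - 352, (g.e.reg .rsp).toNat - 1488⟩ : Span), ⟨g.f + 48, g.f + 56⟩,
      ⟨g.f + 84, g.f + 96⟩, ⟨g.f + 136, g.f + 144⟩, ⟨g.f + 1484, g.f + 1749⟩, ⟨g.f + 1752, g.f + 1784⟩] →
      QuietA g c x := by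
  intro x hx
  simp only [List.mem_cons, List.mem_nil_iff, or_false] at hx
  unfold QuietA
  rcases hx with rfl | rfl | rfl | rfl | rfl | rfl
  · left
    simp only []
    omega
  · right; right; left
    exact ⟨Nat.le_refl _, Nat.le_refl _⟩
  · right; right; right; left
    exact ⟨Nat.le_refl _, Nat.le_refl _⟩
  · right; right; right; right; left
    exact ⟨Nat.le_refl _, Nat.le_refl _⟩
  · right; right; right; right; right; left
    exact ⟨Nat.le_refl _, Nat.le_refl _⟩
  · right; right; right; right; right; right
    exact ⟨Nat.le_refl _, Nat.le_refl _⟩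

/-- **Leg A of C11a** (`cut149` 0x114bad … `cut150` 0x114bbf: `mov esi,20H ; mov r15,[rsp+18H] ; mov rdi,r15 ; call get_bits`):
from `In11P` at the entry of C11 to `In11P` at the return of the first `get_bits(f, 32)`, with `r15 = f`. -/
theorem legA {Lay : Layout} (hLay : Lay.hi = 0x1000000) {μ : Microarch} (hμ : UserX.MicroOK μ) {u₀ : State}
    (hcode : HasCodeNat Lay u₀ Vorbis.L.start_decoder.entry Vorbis.Code.code_start_decoder.nat Vorbis.L.start_decoder.size)
    (hgb : ∀ (others : List Obj) (frames : List (Nat × FrameLayout)) (Blk : Block → Prop) (len : Nat), Calls Lay μ Vorbis.WayInv (Vorbis.conv u₀) Vorbis.L.get_bits.entry (Vorbis.Spec.get_bits.spec others frames Blk len))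
    {g : Ghost} {i : Nat} {A2 A3 Ai : Arena} {A : Arena × List Obj} {v : State}
    (hat : In11P u₀ g i A2 A3 Ai A Vorbis.L.start_decoder.cut149 v) :
    ReachVia Lay μ WayInv v (fun w => In11P u₀ g i A2 A3 Ai A Vorbis.L.start_decoder.cut150 w ∧ w.reg .r15 = addr g.f) := by
  have hfr := hat.frame
  have he := hfr.entry
  v_entry he
  simp only [depth] at he_room he_stack
  have w_rip := hfr.rip
  obtain ⟨hr1, hr2⟩ := hfr.r_eq
  simp only [steady] at hr1
  have hRA : g.RA = (g.e.reg .rsp).toNat := rfl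
  have c_rsp : v.reg .rsp = g.e.reg .rsp - 1480 := by
    rw [hfr.rsp]
    refine (eq_addr _ _ ?_).symm
    unfold Ghost.R Ghost.RA steady
    u_omega
  have hobr := hat.cur.sd.bits.OBR
  simp only [voff] at hobr
  have t1 : (g.e.reg .rsp - 1488).toNat = (g.e.reg .rsp).toNat - 1488 := by u_omega
  have sl_f : v.mem.readLE (g.e.reg .rsp - 1456) 8 = g.f := by
    have e : addr (g.R + 0x18) = g.e.reg .rsp - 1456 := by
      refine (eq_addr _ _ ?_).symm
      unfold Ghost.R Ghost.RA steady
      u_omega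
    rw [← e]
    exact hat.cur.slot_f
  have hst := C4.obj_stack hfr hat.cur.hand
  have w_eq : Mem.EqOn Vorbis.L.textLo Vorbis.L.textHi u₀.mem v.mem := hfr.code
  have hdf : v.flags .df = false := (show abiInv _ from hfr.inv).1
  have hmx : v.mxcsr &&& 0x1F80 = 0x1F80 := (show abiInv _ from hfr.inv).2
  have hsse := Vorbis.sseOK_of_abiInv hfr.inv
  have hgb' := hgb A.2 g.frames' (g.Blk A) g.len
  u_walk hcode [hμ.vendor] until [Vorbis.L.start_decoder.cut150] span [Vorbis.L.textLo, Vorbis.L.textHi] side (v_side)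
  case call_inv => v_inv
  case pre_114bba =>
    have hun : ShadowUntouched v.mem s_114bba.mem := by v_untouched
    refine ⟨C4.reader_pre hfr hat.cur hun ?_ ?_ ?_, ?_⟩
    · rw [w_rsp, t1]
      omega
    · rw [w_rdi]
      rfl
    · rw [w_mem]
      exact Mem.eqOn_writeLE v.mem _ 8 _ g.f 1808 (by rw [t1]; omega) (by rw [t1]; omega)
    · rw [bitsArg_def, w_rsi]
      decide
  -- the return of `get_bits(f, 32)`
  v_after_call w_rsp_114bba w_mem_114bba
  have hf : (s_114bba.reg .rdi).toNat = g.f := by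
    rw [w_rdi_114bba]
    exact toNat_addr g.f (by omega)
  simp only [hf, t1] at w_same
  -- the push and the reader's footprint as one footprint over the cut point's memory
  have hpush := push_same g v.mem 1133503 hr1 he_room he_top
  have hall := same_append hpush w_same
  have hq := quiet_append (quiet_stack g (g.cb v.mem i)) (quiet_reader g (g.cb v.mem i) hr1)
  have hp : GetBitsSpecPost (g.Blk A) g.len (s_114bba.reg .rdi).toNat (bitsArg s_114bba) s_114bba s_114bbar := w_post
  have hbits := hp.bits.bits
  rw [hf] at hbits
  have hun0 : ShadowUntouched v.mem s_114bba.mem := by v_untouched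
  have hunAll : ShadowUntouched v.mem s_114bbar.mem := Mem.EqOn.trans hun0 hp.untouched
  have habi : abiInv s_114bbar := Vorbis.abiInv_of w_df w_mx
  have hrsp : s_114bbar.reg .rsp = v.reg .rsp := by
    rw [w_rsp, c_rsp]
  have hP := carryA (pc' := Vorbis.L.start_decoder.cut150) hat hall hunAll hq hbits w_rip hrsp
    (Vorbis.conv_code_eqOn w_code) habi (w_kept .r14 rfl)
  exact ReachVia.done ⟨hP, w_r15⟩

/-- **Leg B of C11a** (`cut150` 0x114bbf … `cut151` 0x114bc6: `mov edi,eax ; call float32_unpack`): the callee takes any word and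
writes its own stack frame only; `In11P` and `r15 = f` at its return. -/
theorem legB {Lay : Layout} (hLay : Lay.hi = 0x1000000) {μ : Microarch} (hμ : UserX.MicroOK μ) {u₀ : State}
    (hcode : HasCodeNat Lay u₀ Vorbis.L.start_decoder.entry Vorbis.Code.code_start_decoder.nat Vorbis.L.start_decoder.size)
    (hfu : ∀ (others : List Obj) (frames : List (Nat × FrameLayout)), Calls Lay μ Vorbis.WayInv (Vorbis.conv u₀) Vorbis.L.float32_unpack.entry (Vorbis.Spec.float32_unpack.spec others frames))
    {g : Ghost} {i : Nat} {A2 A3 Ai : Arena} {A : Arena × List Obj} {v : State}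
    (hat : In11P u₀ g i A2 A3 Ai A Vorbis.L.start_decoder.cut150 v) (hr15 : v.reg .r15 = addr g.f) :
    ReachVia Lay μ WayInv v (fun w => In11P u₀ g i A2 A3 Ai A Vorbis.L.start_decoder.cut151 w ∧ w.reg .r15 = addr g.f) := by
  have hfr := hat.frame
  have he := hfr.entry
  v_entry he
  simp only [depth] at he_room he_stack
  have w_rip := hfr.rip
  obtain ⟨hr1, hr2⟩ := hfr.r_eq
  simp only [steady] at hr1
  have hRA : g.RA = (g.e.reg .rsp).toNat := rfl
  have c_rsp : v.reg .rsp = g.e.reg .rsp - 1480 := by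
    rw [hfr.rsp]
    refine (eq_addr _ _ ?_).symm
    unfold Ghost.R Ghost.RA steady
    u_omega
  have hobr := hat.cur.sd.bits.OBR
  simp only [voff] at hobr
  have t1 : (g.e.reg .rsp - 1488).toNat = (g.e.reg .rsp).toNat - 1488 := by u_omega
  have hst := C4.obj_stack hfr hat.cur.hand
  have w_eq : Mem.EqOn Vorbis.L.textLo Vorbis.L.textHi u₀.mem v.mem := hfr.code
  have hdf : v.flags .df = false := (show abiInv _ from hfr.inv).1
  have hmx : v.mxcsr &&& 0x1F80 = 0x1F80 := (show abiInv _ from hfr.inv).2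
  have hsse := Vorbis.sseOK_of_abiInv hfr.inv
  have hfu' := hfu A.2 g.frames'
  obtain ⟨z, c_rax⟩ : ∃ z, v.reg .rax = z := ⟨_, rfl⟩
  u_walk hcode [hμ.vendor] until [Vorbis.L.start_decoder.cut151] span [Vorbis.L.textLo, Vorbis.L.textHi] side (v_side)
  case call_inv => v_inv
  case pre_114bc1 =>
    have hun : ShadowUntouched v.mem s_114bc1.mem := by v_untouched
    show ShadowPre A.2 g.frames' s_114bc1
    refine ⟨?_, hfr.offText⟩
    have e : (s_114bc1.reg .rsp).toNat + 8 = g.R := by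
      rw [w_rsp, t1]
      omega
    rw [e]
    exact hfr.shadow.untouched hun
  -- the return of `float32_unpack`
  v_after_call w_rsp_114bc1 w_mem_114bc1
  simp only [t1] at w_same
  have hpush := push_same g v.mem 1133510 hr1 he_room he_top
  have hall := same_append hpush w_same
  have hq : ∀ x, x ∈ [(⟨g.R - 408, g.R⟩ : Span)] ++ [(⟨(g.e.reg .rsp).toNat - 1488 - 40, (g.e.reg .rsp).toNat - 1488⟩ : Span)] →
      QuietA g (g.cb v.mem i) x := by
    refine quiet_append (quiet_stack g (g.cb v.mem i)) ?_
    intro x hx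
    rw [List.mem_singleton.mp hx]
    unfold QuietA
    left
    simp only []
    omega
  have heq : Mem.EqOn g.f (g.f + 1808) v.mem s_114bc1r.mem := by
    apply hall.eqOn
    intro w hw
    simp only [List.cons_append, List.nil_append, List.mem_cons, List.mem_nil_iff, or_false] at hw
    rcases hw with rfl | rfl
    · show g.f + 1808 ≤ g.R - 408 ∨ g.R ≤ g.f
      exact hst
    · show g.f + 1808 ≤ (g.e.reg .rsp).toNat - 1488 - 40 ∨ (g.e.reg .rsp).toNat - 1488 ≤ g.f
      omega
  have hun0 : ShadowUntouched v.mem s_114bc1.mem := by v_untouched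
  have hunAll : ShadowUntouched v.mem s_114bc1r.mem := Mem.EqOn.trans hun0 w_post
  have habi : abiInv s_114bc1r := Vorbis.abiInv_of w_df w_mx
  have hrsp : s_114bc1r.reg .rsp = v.reg .rsp := by
    rw [w_rsp, c_rsp]
  have hP := carryA (pc' := Vorbis.L.start_decoder.cut151) hat hall hunAll hq (C4.bits_same hat.cur heq) w_rip hrsp
    (Vorbis.conv_code_eqOn w_code) habi (w_kept .r14 rfl)
  exact ReachVia.done ⟨hP, (w_kept .r15 rfl).trans hr15⟩

/-- **The stores of leg C before its `get_bits`**: the return address of the check call, the 4 bytes of `c->minimum_value`, the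
return address of `get_bits`, as ONE footprint: the stack window and `[c + 16, c + 20)`. -/
theorem store_same (g : Ghost) (c : Nat) (m : Mem) (a : Word) (x y z : Nat) (ha : a.toNat = c + 16) (hc : c + 20 < 2 ^ 64)
    (hr1 : g.R + 1480 = (g.e.reg .rsp).toNat) (hroom : 7340032 + 1888 ≤ (g.e.reg .rsp).toNat)
    (htop : (g.e.reg .rsp).toNat + 8 ≤ 8388608) :
    Mem.SameExcept [⟨g.R - 408, g.R⟩, ⟨c + 16, c + 20⟩] m
      (((m.writeLE (g.e.reg .rsp - 1488) 8 x).writeLE a 4 y).writeLE (g.e.reg .rsp - 1488) 8 z) := by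
  have t1 : (g.e.reg .rsp - 1488).toNat = (g.e.reg .rsp).toNat - 1488 := by u_omega
  have hstk : ∃ w ∈ [(⟨g.R - 408, g.R⟩ : Span), ⟨c + 16, c + 20⟩],
      w.lo ≤ (g.e.reg .rsp - 1488).toNat ∧ (g.e.reg .rsp - 1488).toNat + 8 ≤ w.hi := by
    refine ⟨⟨g.R - 408, g.R⟩, List.mem_cons_self, ?_, ?_⟩
    · rw [t1]
      show g.R - 408 ≤ _
      omega
    · rw [t1]
      show _ ≤ g.R
      omega
  have hfld : ∃ w ∈ [(⟨g.R - 408, g.R⟩ : Span), ⟨c + 16, c + 20⟩], w.lo ≤ a.toNat ∧ a.toNat + 4 ≤ w.hi := by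
    refine ⟨⟨c + 16, c + 20⟩, List.mem_cons_of_mem _ List.mem_cons_self, ?_, ?_⟩
    · rw [ha]
      exact Nat.le_refl _
    · rw [ha]
      exact Nat.le_refl _
  have h1 := Mem.SameExcept.writeLE _ m (g.e.reg .rsp - 1488) 8 x (by rw [t1]; omega) hstk
  have h2 := Mem.SameExcept.step_writeLE a 4 y h1 (by rw [ha]; omega) hfld
  exact Mem.SameExcept.step_writeLE (g.e.reg .rsp - 1488) 8 z h2 (by rw [t1]; omega) hstk

/-- The stack window and the field `minimum_value` are quiet. -/
theorem quiet_store (g : Ghost) (c : Nat) :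
    ∀ x, x ∈ [(⟨g.R - 408, g.R⟩ : Span), ⟨c + 16, c + 20⟩] → QuietA g c x := by
  intro x hx
  simp only [List.mem_cons, List.mem_nil_iff, or_false] at hx
  unfold QuietA
  rcases hx with rfl | rfl
  · left
    exact ⟨Nat.le_refl _, Nat.le_refl _⟩
  · right; left
    exact ⟨Nat.le_refl _, Nat.le_refl _⟩

/-- **Leg C of C11a** (`cut151` 0x114bc6 … `cut152` 0x114be4: `movd ebx,xmm0 ; lea rdi,[r14+10H] ; call __asan_store4_noabort ;
mov [r14+10H],ebx ; mov esi,20H ; mov rdi,r15 ; call get_bits`): the checked store of `c->minimum_value` (`[c + 16, c + 20)`,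
inside the codebooks block) and the second `get_bits(f, 32)`; `In11P` and `r15 = f` at its return. -/
theorem legC {Lay : Layout} (hLay : Lay.hi = 0x1000000) {μ : Microarch} (hμ : UserX.MicroOK μ) {u₀ : State}
    (hcode : HasCodeNat Lay u₀ Vorbis.L.start_decoder.entry Vorbis.Code.code_start_decoder.nat Vorbis.L.start_decoder.size)
    (hgb : ∀ (others : List Obj) (frames : List (Nat × FrameLayout)) (Blk : Block → Prop) (len : Nat), Calls Lay μ Vorbis.WayInv (Vorbis.conv u₀) Vorbis.L.get_bits.entry (Vorbis.Spec.get_bits.spec others frames Blk len))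
    (hst4 : Asan.SmallCheck Lay μ Vorbis.WayInv (Vorbis.CodeOK u₀) [.rax, .rcx, .rdx] 4 Vorbis.L.__asan_store4_noabort.entry)
    {g : Ghost} {i : Nat} {A2 A3 Ai : Arena} {A : Arena × List Obj} {v : State}
    (hat : In11P u₀ g i A2 A3 Ai A Vorbis.L.start_decoder.cut151 v) (hr15 : v.reg .r15 = addr g.f) :
    ReachVia Lay μ WayInv v (fun w => In11P u₀ g i A2 A3 Ai A Vorbis.L.start_decoder.cut152 w ∧ w.reg .r15 = addr g.f) := by
  have hfr := hat.frame
  have he := hfr.entry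
  v_entry he
  simp only [depth] at he_room he_stack
  have w_rip := hfr.rip
  obtain ⟨hr1, hr2⟩ := hfr.r_eq
  simp only [steady] at hr1
  have hRA : g.RA = (g.e.reg .rsp).toNat := rfl
  have c_rsp : v.reg .rsp = g.e.reg .rsp - 1480 := by
    rw [hfr.rsp]
    refine (eq_addr _ _ ?_).symm
    unfold Ghost.R Ghost.RA steady
    u_omega
  -- the struct `c = cb(i)`: inside the codebooks block, a setup block of the arena
  have ha := hat.cur.sd.arena
  have hcb := hat.cur.ages.cbOK
  have hBA : A.1.Blk (codebooksBlock v.mem g.f) := hcb.F2.mono hat.cur.ages.exti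
  have hcin := hcb.cb_in i hat.cur.lt
  have hboff := ha.block_off hBA
  have hbin := arena_inside ha hBA
  have hbnd := ha.bounds
  simp only [vblock, Off.sizeof.Codebook] at hcin hboff hbin
  have hcdef : stb_vorbis.codebooks_at v.mem g.f i = g.cb v.mem i := rfl
  rw [hcdef] at hcin
  have hBA' : A.1.Block (stb_vorbis.codebooks v.mem g.f) (2120 * (stb_vorbis.codebook_count v.mem g.f).toNat) := hBA
  have e16 : v.reg .r14 + 16 = addr (g.cb v.mem i + 16) := by
    rw [hat.cur.r14]
    exact Vorbis.addr_add_lit _ 16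
  have t16 : (v.reg .r14 + 16).toNat = g.cb v.mem i + 16 := by
    rw [e16]
    exact toNat_addr _ (by omega)
  have hout := hat.cur.hand.objOut
  simp only [voff] at hout
  have hobr := hat.cur.sd.bits.OBR
  simp only [voff] at hobr
  have t1 : (g.e.reg .rsp - 1488).toNat = (g.e.reg .rsp).toNat - 1488 := by u_omega
  have c_r15 : v.reg .r15 = UInt64.ofNat g.f := hr15
  have hst := C4.obj_stack hfr hat.cur.hand
  have htx := hat.cur.hand.arenaText
  simp only [Vorbis.L.textHi] at htx
  have w_eq : Mem.EqOn Vorbis.L.textLo Vorbis.L.textHi u₀.mem v.mem := hfr.code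
  have hdf : v.flags .df = false := (show abiInv _ from hfr.inv).1
  have hmx : v.mxcsr &&& 0x1F80 = 0x1F80 := (show abiInv _ from hfr.inv).2
  have hsse := Vorbis.sseOK_of_abiInv hfr.inv
  have hgb' := hgb A.2 g.frames' (g.Blk A) g.len
  u_walk hcode [hμ.vendor] until [Vorbis.L.start_decoder.cut152] span [Vorbis.L.textLo, Vorbis.L.textHi] side (v_side)
  case check_114bce =>
    -- 0x114bce: the 4 bytes of `c->minimum_value` at `c + 16`, inside the codebooks block (a live setup block)
    have hun : ShadowUntouched v.mem s_114bce.mem := by v_untouched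
    have hsh' := hfr.shadow.untouched hun
    refine ⟨hsh'.sealed, ?_⟩
    rw [t16]
    exact ha.block_acc_inv hsh' hBA' (by omega) (by omega) (by decide)
  case call_inv => v_inv
  case pre_114bdf =>
    have hun : ShadowUntouched v.mem s_114bdf.mem := by v_untouched
    have hstore := store_same g (g.cb v.mem i) v.mem (v.reg .r14 + 16) 1133523 x_114bc6.toNat 1133540 t16 (by omega) hr1
      he_room he_top
    rw [← w_mem] at hstore
    refine ⟨C4.reader_pre hfr hat.cur hun ?_ ?_ ?_, ?_⟩
    · rw [w_rsp, t1]
      omega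
    · exact w_rdi
    · apply hstore.eqOn
      intro w hw
      simp only [List.mem_cons, List.mem_nil_iff, or_false] at hw
      rcases hw with rfl | rfl
      · show g.f + 1808 ≤ g.R - 408 ∨ g.R ≤ g.f
        exact hst
      · show g.f + 1808 ≤ g.cb v.mem i + 16 ∨ g.cb v.mem i + 20 ≤ g.f
        omega
    · rw [bitsArg_def, w_rsi]
      decide
  -- the return of the second `get_bits(f, 32)`
  v_after_call w_rsp_114bdf w_mem_114bdf
  have hf : (s_114bdf.reg .rdi).toNat = g.f := by
    rw [w_rdi_114bdf]
    exact toNat_addr g.f (by omega)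
  simp only [hf, t1] at w_same
  -- the stores and the reader's footprint as one footprint over the cut point's memory
  have hstore := store_same g (g.cb v.mem i) v.mem (v.reg .r14 + 16) 1133523 x_114bc6.toNat 1133540 t16 (by omega) hr1
    he_room he_top
  have hall := same_append hstore w_same
  have hq := quiet_append (quiet_store g (g.cb v.mem i)) (quiet_reader g (g.cb v.mem i) hr1)
  have hp : GetBitsSpecPost (g.Blk A) g.len (s_114bdf.reg .rdi).toNat (bitsArg s_114bdf) s_114bdf s_114bdfr := w_post
  have hbits := hp.bits.bits
  rw [hf] at hbits
  have hun0 : ShadowUntouched v.mem s_114bdf.mem := by v_untouched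
  have hunAll : ShadowUntouched v.mem s_114bdfr.mem := Mem.EqOn.trans hun0 hp.untouched
  have habi : abiInv s_114bdfr := Vorbis.abiInv_of w_df w_mx
  have hrsp : s_114bdfr.reg .rsp = v.reg .rsp := by
    rw [w_rsp, c_rsp]
  have hP := carryA (pc' := Vorbis.L.start_decoder.cut152) hat hall hunAll hq hbits w_rip hrsp
    (Vorbis.conv_code_eqOn w_code) habi (w_kept .r14 rfl)
  exact ReachVia.done ⟨hP, (w_kept .r15 rfl).trans hr15⟩

end Vorbis.Spec.start_decoder_C11a
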